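-- pv_equiv track=rewrite | github.com/GiadaSimionato/Analysis_and_Implementation_of_Sense_Embedding | code/sew_utils.py | getSensesSew
-- ===== SOURCE A (Python) =====
-- import string
--
-- def getSensesSew(annotations):
--
--     d = dict()
--     for annotation in annotations:
--         for a in annotation:
--             lemma = a[1].replace(' ', '_').strip(string.punctuation) # removes all the punctuation from the lemma and sets it in correct format
--             bnId = a[0]
--             if lemma in d and bnId not in d[lemma]:  # if the lemma is already in the dictionaty append the new id
--                 d[lemma].append(bnId)
--             elif lemma not in d:                     # otherwise create new element with that id as list
--                 d[lemma] = [bnId]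
--     return d
-- ===== SOURCE B (Python) =====
-- import string
--
-- def getSensesSew(annotations):
--     # Phase 1: group every id under its cleaned lemma, no dedup branch.
--     groups = {}
--     for annotation in annotations:
--         for a in annotation:
--             lemma = a[1].replace(' ', '_').strip(string.punctuation)
--             groups.setdefault(lemma, []).append(a[0])
--     # Phase 2: deduplicate each group keeping first-occurrence order.
--     return {lemma: list(dict.fromkeys(ids)) for lemma, ids in groups.items()}
-- ===== Notes on version B (the rewrite author's own statement) =====
-- stated objective: simpler
-- what changed: A dedups inline with an if/elif membership branch while building the dict; B removes the branch entirely: one plain collecting pass (setdefault/append) builds all ids per cleaned lemma, then a second comprehension pass dedups each group with dict.fromkeys preserving first-occurrence order.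
import Mathlib
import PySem

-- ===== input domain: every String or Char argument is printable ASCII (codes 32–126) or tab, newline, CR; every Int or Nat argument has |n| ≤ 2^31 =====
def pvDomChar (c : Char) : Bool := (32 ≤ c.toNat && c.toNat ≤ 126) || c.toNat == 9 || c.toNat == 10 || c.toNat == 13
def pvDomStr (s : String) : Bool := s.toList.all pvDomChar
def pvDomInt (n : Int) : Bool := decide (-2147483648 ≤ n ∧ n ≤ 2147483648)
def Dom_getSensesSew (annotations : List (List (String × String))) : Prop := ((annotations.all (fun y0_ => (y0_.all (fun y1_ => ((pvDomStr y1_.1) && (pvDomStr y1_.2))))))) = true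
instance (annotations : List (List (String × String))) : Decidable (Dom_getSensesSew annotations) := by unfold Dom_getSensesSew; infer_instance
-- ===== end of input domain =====

-- B replaces A's inline if/elif dedup inside the grouping loop by a plain collect-all pass
-- (setdefault/append, no branch) followed by a second per-group ordered-dedup pass: simpler decomposition.

-- string.punctuation
def pvPunct : String := "!\"#$%&'()*+,-./:;<=>?@[\\]^_`{|}~"

-- a[1].replace(' ', '_').strip(string.punctuation)  (shared expression of both sources)
def pvCleanLemma (s : String) : String :=
  PySem.Str.stripChars (PySem.Str.replace s " " "_") pvPunct

-- ===== PORT A =====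
-- body of A's inner loop
def getSensesSewStepA (d : PySem.Dict String (List String)) (a : String × String) :
    PySem.Dict String (List String) :=
  let lem := pvCleanLemma a.2
  let bnId := a.1
  if d.contains lem && !((d.getD lem []).contains bnId) then
    d.insert lem ((d.getD lem []) ++ [bnId])        -- d[lemma].append(bnId)
  else if !(d.contains lem) then
    d.insert lem [bnId]                               -- d[lemma] = [bnId]
  else
    d

def getSensesSew (annotations : List (List (String × String))) : List (String × List String) :=
  (annotations.foldl (fun d annotation => annotation.foldl getSensesSewStepA d)
    PySem.Dict.empty).items

-- ===== PORT B =====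
-- body of B's collecting loop: groups.setdefault(lemma, []).append(a[0])
def getSensesSewStepB (g : PySem.Dict String (List String)) (a : String × String) :
    PySem.Dict String (List String) :=
  g.modify (pvCleanLemma a.2) [] (· ++ [a.1])

def getSensesSew_alt (annotations : List (List (String × String))) : List (String × List String) :=
  let groups := annotations.foldl (fun g annotation => annotation.foldl getSensesSewStepB g)
    PySem.Dict.empty
  -- {lemma: list(dict.fromkeys(ids)) for lemma, ids in groups.items()}
  groups.items.map (fun p => (p.1, PySem.List.dedup p.2))

-- ===== PRECONDITION & SPEC =====
def Spec_getSensesSew (annotations : List (List (String × String))) (out : List (String × List String)) : Prop := out = getSensesSew_alt annotations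
instance (annotations : List (List (String × String))) (out : List (String × List String)) : Decidable (Spec_getSensesSew annotations out) := by unfold Spec_getSensesSew; infer_instance

-- ===== CLAIM (what is proved, stated in full; the proofs are below) =====
def Claim_equal_getSensesSew : Prop := ∀ (annotations : List (List (String × String))), Dom_getSensesSew annotations → Spec_getSensesSew annotations (getSensesSew annotations)

-- ===== LEMMAS AND PROOFS =====

-- A's dict is B's dict with every value list deduplicated (first occurrences, in order).
def pvMapVal (d : PySem.Dict String (List String)) : PySem.Dict String (List String) :=
  PySem.Dict.mk (d.items.map (fun p => (p.1, PySem.List.dedup p.2)))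

theorem pv_get?_mapVal (d : PySem.Dict String (List String)) (k : String) :
    (pvMapVal d).get? k = (d.get? k).map PySem.List.dedup := by
  obtain ⟨l⟩ := d
  induction l with
  | nil => rfl
  | cons p rest ih =>
    simp only [pvMapVal, List.map_cons] at *
    rw [PySem.Dict.get?_mk_cons, PySem.Dict.get?_mk_cons]
    by_cases h : p.1 == k
    · simp [h]
    · simp only [h, Bool.false_eq_true, if_false]; exact ih

theorem pv_contains_mapVal (d : PySem.Dict String (List String)) (k : String) :
    (pvMapVal d).contains k = d.contains k := by
  rw [PySem.Dict.contains_eq_isSome_get?, PySem.Dict.contains_eq_isSome_get?,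
    pv_get?_mapVal, Option.isSome_map]

theorem pv_getD_mapVal (d : PySem.Dict String (List String)) (k : String) :
    (pvMapVal d).getD k [] = PySem.List.dedup (d.getD k []) := by
  rw [PySem.Dict.getD_eq_get?_getD, PySem.Dict.getD_eq_get?_getD, pv_get?_mapVal]
  cases d.get? k <;> rfl

theorem pv_keys_mapVal (d : PySem.Dict String (List String)) :
    (pvMapVal d).keys = d.keys := by
  obtain ⟨l⟩ := d
  simp [pvMapVal, PySem.Dict.keys_mk, List.map_map, Function.comp]

theorem pv_mapVal_insert (d : PySem.Dict String (List String)) (k : String) (v : List String) :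
    pvMapVal (d.insert k v) = (pvMapVal d).insert k (PySem.List.dedup v) := by
  apply PySem.Dict.ext
  show (d.insert k v).items.map (fun p => (p.1, PySem.List.dedup p.2))
      = ((pvMapVal d).insert k (PySem.List.dedup v)).items
  rw [PySem.Dict.items_insert, PySem.Dict.items_insert, pv_contains_mapVal]
  by_cases h : d.contains k
  · simp only [h, if_true, pvMapVal, List.map_map]
    apply List.map_congr_left
    intro p _
    by_cases hk : p.1 == k <;> simp [Function.comp, hk]
  · simp [h, pvMapVal]

theorem pv_insert_self (d : PySem.Dict String (List String)) (k : String) (v : List String)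
    (hn : d.keys.Nodup) (h : d.get? k = some v) : d.insert k v = d := by
  apply PySem.Dict.ext
  have hc : d.contains k = true := by
    rw [PySem.Dict.contains_eq_isSome_get?, h]; rfl
  rw [PySem.Dict.items_insert, if_pos hc]
  rw [List.map_congr_left (g := id) ?_, List.map_id]
  intro p hp
  by_cases hk : p.1 == k
  · have hk' : p.1 = k := by simpa using hk
    have hg := PySem.Dict.get?_of_mem_items (d := d) (k := p.1) (v := p.2) hp hn
    rw [hk', h] at hg
    have hv : v = p.2 := by simpa using hg
    simp only [hk, if_true, id_eq]
    exact Prod.ext_iff.mpr ⟨hk'.symm, hv⟩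
  · simp [hk]

theorem pv_dedup_append_singleton (v : List String) (x : String) :
    PySem.List.dedup (v ++ [x]) =
      if x ∈ v then PySem.List.dedup v else PySem.List.dedup v ++ [x] := by
  simp only [PySem.List.dedup_eq_ofList]
  rw [PySem.Set.ofList_eq_foldl, List.foldl_append, List.foldl_cons, List.foldl_nil,
    ← PySem.Set.ofList_eq_foldl]
  show PySem.Set.add _ _ = _
  unfold PySem.Set.add
  by_cases h : x ∈ v <;> simp [PySem.Set.contains, h]

-- one step commutes with pvMapVal
theorem pv_step_comm (d : PySem.Dict String (List String)) (a : String × String)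
    (hn : d.keys.Nodup) :
    getSensesSewStepA (pvMapVal d) a = pvMapVal (getSensesSewStepB d a) := by
  have hmod : getSensesSewStepB d a
      = d.insert (pvCleanLemma a.2) ((d.getD (pvCleanLemma a.2) []) ++ [a.1]) := rfl
  rw [hmod, pv_mapVal_insert, pv_dedup_append_singleton]
  simp only [getSensesSewStepA, pv_contains_mapVal, pv_getD_mapVal]
  by_cases hc : d.contains (pvCleanLemma a.2)
  · have hget : d.get? (pvCleanLemma a.2) = some (d.getD (pvCleanLemma a.2) []) := by
      rw [PySem.Dict.contains_eq_isSome_get?] at hc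
      cases hg : d.get? (pvCleanLemma a.2) with
      | none => rw [hg] at hc; simp at hc
      | some w => rw [PySem.Dict.getD_eq_get?_getD, hg]; rfl
    by_cases hm : a.1 ∈ d.getD (pvCleanLemma a.2) []
    · have hmem : (PySem.List.dedup (d.getD (pvCleanLemma a.2) [])).contains a.1 = true := by
        simp [hm]
      rw [if_pos hm]
      simp only [hc, hmem, Bool.not_true, Bool.and_false, Bool.false_eq_true, if_false,
        Bool.not_true]
      have hgetM : (pvMapVal d).get? (pvCleanLemma a.2)
          = some (PySem.List.dedup (d.getD (pvCleanLemma a.2) [])) := by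
        rw [pv_get?_mapVal, hget]; rfl
      have hnM : (pvMapVal d).keys.Nodup := by rw [pv_keys_mapVal]; exact hn
      exact (pv_insert_self _ _ _ hnM hgetM).symm
    · have hmem : (PySem.List.dedup (d.getD (pvCleanLemma a.2) [])).contains a.1 = false := by
        simp [hm]
      rw [if_neg hm]
      simp only [hc, hmem, Bool.not_false, Bool.and_true, if_true]
  · have hc' : d.contains (pvCleanLemma a.2) = false := by simpa using hc
    have hv0 : d.getD (pvCleanLemma a.2) [] = [] :=
      PySem.Dict.getD_of_not_contains d [] hc'
    simp [hc', hv0, PySem.List.dedup]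

theorem pv_nodup_stepB (d : PySem.Dict String (List String)) (a : String × String)
    (hn : d.keys.Nodup) : (getSensesSewStepB d a).keys.Nodup := by
  have : getSensesSewStepB d a
      = d.insert (pvCleanLemma a.2) ((d.getD (pvCleanLemma a.2) []) ++ [a.1]) := rfl
  rw [this]
  exact PySem.Dict.nodup_keys_insert _ _ _ hn

theorem pv_foldl_inner (l : List (String × String)) (d : PySem.Dict String (List String))
    (hn : d.keys.Nodup) :
    l.foldl getSensesSewStepA (pvMapVal d) = pvMapVal (l.foldl getSensesSewStepB d) := by
  induction l generalizing d with
  | nil => rfl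
  | cons a rest ih =>
    simp only [List.foldl_cons]
    rw [pv_step_comm d a hn]
    exact ih _ (pv_nodup_stepB d a hn)

theorem pv_nodup_foldl_inner (l : List (String × String)) (d : PySem.Dict String (List String))
    (hn : d.keys.Nodup) : (l.foldl getSensesSewStepB d).keys.Nodup := by
  induction l generalizing d with
  | nil => exact hn
  | cons a rest ih => exact ih _ (pv_nodup_stepB d a hn)

theorem pv_foldl_outer (ls : List (List (String × String))) (d : PySem.Dict String (List String))
    (hn : d.keys.Nodup) :
    ls.foldl (fun d annotation => annotation.foldl getSensesSewStepA d) (pvMapVal d)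
      = pvMapVal (ls.foldl (fun g annotation => annotation.foldl getSensesSewStepB g) d) := by
  induction ls generalizing d with
  | nil => rfl
  | cons l rest ih =>
    simp only [List.foldl_cons]
    rw [pv_foldl_inner l d hn]
    exact ih _ (pv_nodup_foldl_inner l d hn)

-- ===== VERDICT (by name: the statement is the Claim_ definition above) =====
theorem getSensesSew_spec : Claim_equal_getSensesSew := by
  intro annotations _
  unfold Spec_getSensesSew getSensesSew getSensesSew_alt
  have h0 : (PySem.Dict.empty : PySem.Dict String (List String)) = pvMapVal PySem.Dict.empty := rfl
  rw [h0, pv_foldl_outer _ _ (by simp [PySem.Dict.keys_empty])]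
  rfl
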